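-- pv_equiv track=rewrite | github.com/hanjoondev/zb-study | acmicpc/A01533.py | solution
-- ===== SOURCE A (Python) =====
-- def mul(a: list[list[int]], b: list[list[int]], mod: int) -> list[list[int]]:
--     return [[sum(x * y for x, y in zip(ar, bc)) % mod
--             for bc in zip(*b)] for ar in a]
--
-- def mpow(mat: list[list[int]], exp: int, mod: int) -> list[list[int]]:
--     if exp == 1:
--         return mat
--     m = mpow(mat, exp // 2, mod)
--     return mul(mul(m, m, mod), mat, mod) if exp & 1 else mul(m, m, mod)
--
-- def solution(g: list[list[int]], n: int, s: int, e: int, t: int) -> str: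
--     matrix = [[0] * (5 * n) for _ in range(5 * n)]
--     for i in range(n):
--         for j in range(1, 5):
--             matrix[5 * i + j - 1][5 * i + j] = 1
--     for i, r in enumerate(g):
--         for j, c in enumerate(r):
--             if c > 0:
--                 matrix[5 * i + c - 1][5 * j] = 1
--     return mpow(matrix, t, int(1e6) + 3)[5 * (s - 1)][5 * (e - 1)]
-- ===== SOURCE B (Python) =====
-- def mul(a: list[list[int]], b: list[list[int]], mod: int) -> list[list[int]]:
--     return [[sum(x * y for x, y in zip(ar, bc)) % mod
--             for bc in zip(*b)] for ar in a]
--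
-- def mpow(mat: list[list[int]], exp: int, mod: int) -> list[list[int]]:
--     # iterative binary exponentiation, most-significant bit first
--     bits = []
--     while exp > 1:
--         bits.append(exp & 1)
--         exp >>= 1
--     result = mat
--     for bit in reversed(bits):
--         result = mul(result, result, mod)
--         if bit:
--             result = mul(result, mat, mod)
--     return result
--
-- def solution(g: list[list[int]], n: int, s: int, e: int, t: int) -> str:
--     matrix = [[0] * (5 * n) for _ in range(5 * n)]
--     for i in range(n):
--         for j in range(1, 5):
--             matrix[5 * i + j - 1][5 * i + j] = 1
--     for i, r in enumerate(g):
--         for j, c in enumerate(r):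
--             if c > 0:
--                 matrix[5 * i + c - 1][5 * j] = 1
--     return mpow(matrix, t, int(1e6) + 3)[5 * (s - 1)][5 * (e - 1)]
-- ===== Notes on version B (the rewrite author's own statement) =====
-- stated objective: alternative
-- what changed: The recursive halving mpow is replaced by an iterative binary exponentiation: the bits of t below the most significant are collected in a loop and then folded MSB-first with square-and-multiply; matrix construction and mul are unchanged.
import Mathlib
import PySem

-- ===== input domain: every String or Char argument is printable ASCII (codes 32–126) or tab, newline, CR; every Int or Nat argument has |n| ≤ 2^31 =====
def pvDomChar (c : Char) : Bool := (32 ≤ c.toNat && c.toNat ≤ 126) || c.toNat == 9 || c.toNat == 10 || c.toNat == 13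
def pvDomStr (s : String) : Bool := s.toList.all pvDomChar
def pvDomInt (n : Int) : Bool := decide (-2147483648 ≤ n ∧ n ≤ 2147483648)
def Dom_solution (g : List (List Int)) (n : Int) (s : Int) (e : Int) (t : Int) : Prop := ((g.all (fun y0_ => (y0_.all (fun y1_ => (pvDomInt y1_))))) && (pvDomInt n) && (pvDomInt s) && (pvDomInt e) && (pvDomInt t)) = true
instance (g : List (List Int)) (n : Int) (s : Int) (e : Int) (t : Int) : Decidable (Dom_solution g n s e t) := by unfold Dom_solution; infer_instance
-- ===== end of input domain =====

-- B replaces A's recursive halving mpow by an iterative bit-loop binary exponentiation (alternative decomposition, same cost); matrix construction and matMul are shared code.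

-- ===== PORT A =====
-- zip(*b): Python's zip of b's rows — columns truncated to the shortest row
def zipStar (rows : List (List Int)) : List (List Int) :=
  match rows with
  | [] => []
  | r :: rs =>
      (List.range ((rs.map List.length).foldl min r.length)).map
        (fun k => (r :: rs).map (fun row => row.getD k 0))

def matMul (a b : List (List Int)) (md : Int) : List (List Int) :=
  a.map (fun ar =>
    (zipStar b).map (fun bc =>
      PySem.Int.mod (((ar.zip bc).map (fun p => p.1 * p.2)).sum) md))

-- A's mpow; Python's 'if exp == 1: return mat' — for exp ≤ 0 Python never terminates
-- (those inputs are outside Pre_), here we return mat so the recursion is well-founded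
def mpowA (mat : List (List Int)) (exp : Int) (md : Int) : List (List Int) :=
  if exp ≤ 1 then mat
  else
    let m := mpowA mat (PySem.Int.floordiv exp 2) md
    if PySem.Int.band exp 1 = 1 then matMul (matMul m m md) mat md else matMul m m md
termination_by exp.toNat
decreasing_by
  have h2 : PySem.Int.floordiv exp 2 = exp / 2 := PySem.Int.floordiv_eq_ediv_of_pos (by omega)
  rw [h2]; omega

-- matrix[a][b] = v (both indices nonnegative at every call site; Python raises when out of range — excluded by Pre_; pySetD is a no-op there)
def setAt (m : List (List Int)) (a b v : Int) : List (List Int) :=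
  PySem.List.pySetD m a (PySem.List.pySetD (PySem.List.pyGetD m a []) b v)

def buildMatrix (g : List (List Int)) (n : Int) : List (List Int) :=
  let m0 : List (List Int) :=
    List.replicate (5 * n).toNat (List.replicate (5 * n).toNat (0 : Int))
  let m1 := (PySem.List.pyRange 0 n 1).foldl (fun m i =>
      (PySem.List.pyRange 1 5 1).foldl (fun m j =>
        setAt m (5 * i + j - 1) (5 * i + j) 1) m) m0
  (PySem.List.enumerate g 0).foldl (fun m ir =>
      (PySem.List.enumerate ir.2 0).foldl (fun m jc =>
        if jc.2 > 0 then setAt m (5 * ir.1 + jc.2 - 1) (5 * jc.1) 1 else m) m) m1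

def solution (g : List (List Int)) (n : Int) (s : Int) (e : Int) (t : Int) : Int :=
  PySem.List.pyGetD
    (PySem.List.pyGetD (mpowA (buildMatrix g n) t 1000003) (5 * (s - 1)) [])
    (5 * (e - 1)) 0

-- ===== PORT B =====
-- the while loop of Source B's mpow: bits.append(exp & 1); exp >>= 1 while exp > 1
def collectBits (bits : List Int) (e : Int) : List Int :=
  if 1 < e then collectBits (bits ++ [PySem.Int.band e 1]) (PySem.Int.floordiv e 2)
  else bits
termination_by e.toNat
decreasing_by
  have h2 : PySem.Int.floordiv e 2 = e / 2 := PySem.Int.floordiv_eq_ediv_of_pos (by omega)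
  rw [h2]; omega

def mpowB (mat : List (List Int)) (exp : Int) (md : Int) : List (List Int) :=
  (collectBits [] exp).reverse.foldl
    (fun r bit =>
      let r2 := matMul r r md
      if bit ≠ 0 then matMul r2 mat md else r2) mat

def solution_alt (g : List (List Int)) (n : Int) (s : Int) (e : Int) (t : Int) : Int :=
  PySem.List.pyGetD
    (PySem.List.pyGetD (mpowB (buildMatrix g n) t 1000003) (5 * (s - 1)) [])
    (5 * (e - 1)) 0

-- ===== PRECONDITION & SPEC =====
-- Pre_ is exactly where A returns: t ≥ 1 (A's mpow recurses unboundedly otherwise — RecursionError),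
-- n ≥ 1 and in-range s, e (else IndexError on the final lookup; negative wraparound down to 1-n is allowed),
-- and every positive grid entry c at row i, column j must satisfy 5i+c-1 < 5n and j < n (else IndexError on the write).
def Pre_solution (g : List (List Int)) (n : Int) (s : Int) (e : Int) (t : Int) : Prop :=
  1 ≤ n ∧ 1 ≤ t ∧ 1 - n ≤ s ∧ s ≤ n ∧ 1 - n ≤ e ∧ e ≤ n ∧
  ((PySem.List.enumerate g 0).all (fun ir =>
    (PySem.List.enumerate ir.2 0).all (fun jc =>
      decide (jc.2 ≤ 0 ∨ (5 * ir.1 + jc.2 - 1 < 5 * n ∧ jc.1 < n))))) = true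
instance (g : List (List Int)) (n : Int) (s : Int) (e : Int) (t : Int) : Decidable (Pre_solution g n s e t) := by unfold Pre_solution; infer_instance

def pvWitness_solution : List (List Int) × Int × Int × Int × Int := ([[1]], 1, 1, 1, 1)

def Spec_solution (g : List (List Int)) (n : Int) (s : Int) (e : Int) (t : Int) (out : Int) : Prop := out = solution_alt g n s e t
instance (g : List (List Int)) (n : Int) (s : Int) (e : Int) (t : Int) (out : Int) : Decidable (Spec_solution g n s e t out) := by unfold Spec_solution; infer_instance

-- ===== CLAIM (what is proved, stated in full; the proofs are below) =====
def Claim_equal_solution : Prop := ∀ (g : List (List Int)) (n : Int) (s : Int) (e : Int) (t : Int), Dom_solution g n s e t → Pre_solution g n s e t → Spec_solution g n s e t (solution g n s e t)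

-- ===== LEMMAS AND PROOFS =====

theorem collectBits_append (k : Nat) : ∀ (e : Int), e.toNat ≤ k → ∀ bits,
    collectBits bits e = bits ++ collectBits [] e := by
  induction k with
  | zero =>
      intro e he bits
      have : ¬ 1 < e := by omega
      rw [collectBits, if_neg this]
      conv_rhs => rw [collectBits, if_neg this]
      simp
  | succ k ih =>
      intro e he bits
      by_cases h : 1 < e
      · have h2 : PySem.Int.floordiv e 2 = e / 2 := PySem.Int.floordiv_eq_ediv_of_pos (by omega)
        rw [collectBits, if_pos h, ih _ (by rw [h2]; omega)]
        conv_rhs => rw [collectBits, if_pos h, ih _ (by rw [h2]; omega)]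
        simp
      · rw [collectBits, if_neg h, collectBits, if_neg h]; simp

theorem mpow_eq (k : Nat) : ∀ (e : Int), e.toNat ≤ k → 1 ≤ e → ∀ mat md,
    mpowB mat e md = mpowA mat e md := by
  induction k with
  | zero => intro e he h1; omega
  | succ k ih =>
      intro e he h1 mat md
      by_cases h : 1 < e
      · have h2 : PySem.Int.floordiv e 2 = e / 2 := PySem.Int.floordiv_eq_ediv_of_pos (by omega)
        have hb : PySem.Int.band e 1 = PySem.Int.mod e 2 := PySem.Int.band_one e
        have hm0 : 0 ≤ PySem.Int.mod e 2 := PySem.Int.mod_nonneg e (by omega)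
        have hm1 : PySem.Int.mod e 2 < 2 := PySem.Int.mod_lt e (by omega)
        have hrec : mpowB mat (PySem.Int.floordiv e 2) md = mpowA mat (PySem.Int.floordiv e 2) md :=
          ih _ (by rw [h2]; omega) (by rw [h2]; omega) mat md
        unfold mpowB at hrec ⊢
        rw [collectBits, if_pos h, collectBits_append k _ (by rw [h2]; omega)]
        simp only [List.nil_append, List.reverse_append, List.reverse_cons, List.reverse_nil,
          List.foldl_append, List.foldl_cons, List.foldl_nil]
        rw [hrec]
        conv_rhs => rw [mpowA, if_neg (by omega : ¬ e ≤ 1)]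
        by_cases hodd : PySem.Int.band e 1 = 1
        · simp only [hodd]
          simp
        · have : PySem.Int.band e 1 = 0 := by omega
          simp only [this]
          simp
      · -- e = 1
        have he1 : e = 1 := by omega
        subst he1
        unfold mpowB
        rw [collectBits, if_neg (by omega)]
        rw [mpowA]
        simp

-- ===== VERDICT (by name: the statement is the Claim_ definition above) =====
theorem solution_spec : Claim_equal_solution := by
  intro g n s e t _hdom hpre
  unfold Spec_solution solution solution_alt
  rw [mpow_eq t.toNat t le_rfl hpre.2.1]
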